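-- pv_equiv track=rewrite | github.com/sandialabs/hpc-connect | src/hpc_connect/config.py | process_config_path
-- ===== SOURCE A (Python) =====
-- def process_config_path(path: str) -> list[str]:
--     result: list[str] = []
--     if path.startswith(":"):
--         raise ValueError(f"Illegal leading ':' in path {path}")
--     while path:
--         front, _, path = path.partition(":")
--         result.append(front)
--         if path.startswith(("{", "[")):
--             result.append(path)
--             return result
--     return result
-- ===== SOURCE B (Python) =====
-- def process_config_path(path: str) -> list[str]:
--     if path.startswith(":"):
--         raise ValueError(f"Illegal leading ':' in path {path}")
--     segments = path.split(":")
--     result: list[str] = []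
--     for i, segment in enumerate(segments):
--         result.append(segment)
--         remainder = ":".join(segments[i + 1:])
--         if remainder.startswith(("{", "[")):
--             result.append(remainder)
--             return result
--     if result and result[-1] == "":
--         result.pop()
--     return result
-- ===== Notes on version B (the rewrite author's own statement) =====
-- stated objective: alternative
-- what changed: A consumes the string with a while/partition loop that re-binds `path` each turn; B splits on ':' once up front, scans the segments by index with the early-return brace test done on the re-joined remainder, and pops a single trailing empty field after the loop.
-- outside the precondition, e.g. on process_config_path(':'): A raises ValueError, B raises ValueError
import Mathlib
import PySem

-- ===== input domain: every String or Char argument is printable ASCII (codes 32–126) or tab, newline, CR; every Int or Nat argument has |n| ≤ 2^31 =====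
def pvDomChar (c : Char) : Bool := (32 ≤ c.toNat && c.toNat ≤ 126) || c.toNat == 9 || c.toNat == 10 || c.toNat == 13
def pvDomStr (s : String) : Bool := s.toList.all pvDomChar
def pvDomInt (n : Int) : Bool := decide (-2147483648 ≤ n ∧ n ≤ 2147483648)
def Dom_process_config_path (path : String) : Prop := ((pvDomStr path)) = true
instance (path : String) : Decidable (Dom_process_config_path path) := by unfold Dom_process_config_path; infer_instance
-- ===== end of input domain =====

-- B replaces A's while/partition consumption loop by split-on-':' once, then an
-- indexed scan whose remainder is re-joined, with a single trailing-'' pop (objective: alternative).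


-- ===== PORT A =====
-- front, _, path = path.partition(":")  — exact hand port (PySem has no partition):
-- first component = text before the first ':', second = text after it ([] when no ':').
def pvPartColon : List Char → List Char × List Char
  | [] => ([], [])
  | c :: cs => if c = ':' then ([], cs) else
      let p := pvPartColon cs
      (c :: p.1, p.2)

theorem pvPartColon_snd_le (cs : List Char) : (pvPartColon cs).2.length ≤ cs.length := by
  induction cs with
  | nil => simp [pvPartColon]
  | cons c cs ih =>
    by_cases h : c = ':'
    · simp [pvPartColon, h]
    · simp [pvPartColon, h]; omega

theorem pvPartColon_snd_lt (cs : List Char) (h : cs ≠ []) :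
    (pvPartColon cs).2.length < cs.length := by
  cases cs with
  | nil => exact absurd rfl h
  | cons c cs =>
    by_cases hc : c = ':'
    · simp [pvPartColon, hc]
    · have := pvPartColon_snd_le cs
      simp [pvPartColon, hc]
      omega

-- while path: front,_,path = partition(':'); result.append(front);
--   if path.startswith(("{","[")): result.append(path); return result
def pvLoopA (cs : List Char) (result : List String) : List String :=
  if _h : cs = [] then result
  else
    let p := pvPartColon cs
    let result := result ++ [String.ofList p.1]
    if PySem.Chars.startswith p.2 ['{'] || PySem.Chars.startswith p.2 ['['] then
      result ++ [String.ofList p.2]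
    else pvLoopA p.2 result
termination_by cs.length
decreasing_by exact pvPartColon_snd_lt cs _h

def process_config_path (path : String) : List String :=
  if PySem.Str.startswith path ":" then []   -- Python A raises ValueError here (outside Pre_)
  else pvLoopA path.toList []

-- ===== PORT B =====
-- for i, segment in enumerate(segments): result.append(segment);
--   remainder = ':'.join(segments[i+1:]); early return (flag true) on '{'/'[' remainder.
def pvAltLoop : List (List Char) → List String → List String × Bool
  | [], result => (result, false)
  | seg :: rest, result =>
      let result := result ++ [String.ofList seg]
      let remainder := PySem.Chars.join [':'] rest
      if PySem.Chars.startswith remainder ['{'] || PySem.Chars.startswith remainder ['['] then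
        (result ++ [String.ofList remainder], true)
      else pvAltLoop rest result

def process_config_path_alt (path : String) : List String :=
  if PySem.Str.startswith path ":" then []   -- Python B raises ValueError here (outside Pre_)
  else
    let segments := PySem.Chars.splitOn path.toList [':']
    match pvAltLoop segments [] with
    | (result, true) => result
    | (result, false) =>
        if result ≠ [] ∧ PySem.List.pyGet? result (-1) = some "" then result.dropLast
        else result

-- ===== PRECONDITION & SPEC =====
-- Pre_ excludes exactly the inputs where Python A (and B) raise ValueError: a leading ':'.
def Pre_process_config_path (path : String) : Prop :=
  PySem.Str.startswith path ":" = false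
instance (path : String) : Decidable (Pre_process_config_path path) := by
  unfold Pre_process_config_path; infer_instance
def pvWitness_process_config_path : String := "a:b{c:[d"
def Spec_process_config_path (path : String) (out : List String) : Prop := out = process_config_path_alt path
instance (path : String) (out : List String) : Decidable (Spec_process_config_path path out) := by unfold Spec_process_config_path; infer_instance

-- ===== CLAIM (what is proved, stated in full; the proofs are below) =====
def Claim_equal_process_config_path : Prop := ∀ (path : String), Dom_process_config_path path → Pre_process_config_path path → Spec_process_config_path path (process_config_path path)

-- ===== LEMMAS AND PROOFS =====

-- structural model of str.split(':') used only in the proofs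
def mySplit : List Char → List (List Char)
  | [] => [[]]
  | c :: r => if c = ':' then [] :: mySplit r else (mySplit r).modifyHead (c :: ·)

theorem mySplit_ne_nil (cs : List Char) : mySplit cs ≠ [] := by
  induction cs with
  | nil => simp [mySplit]
  | cons c r ih =>
    by_cases h : c = ':'
    · simp [mySplit, h]
    · cases hr : mySplit r with
      | nil => exact absurd hr ih
      | cons a t => simp [mySplit, h, hr]

theorem splitOn_go_eq (fuel : Nat) (l cur : List Char) (acc : List (List Char))
    (h : l.length < fuel) :
    PySem.Chars.splitOn.go [':'] fuel l cur acc
      = acc.reverse ++ (mySplit l).modifyHead (cur.reverse ++ ·) := by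
  induction fuel generalizing l cur acc with
  | zero => omega
  | succ fuel ih =>
    cases l with
    | nil => simp [PySem.Chars.splitOn.go, mySplit]
    | cons c rest =>
      by_cases hc : c = ':'
      · subst hc
        rw [show PySem.Chars.splitOn.go [':'] (fuel+1) (':' :: rest) cur acc
              = PySem.Chars.splitOn.go [':'] fuel (List.drop 1 (':' :: rest)) [] (cur.reverse :: acc) by
            simp [PySem.Chars.splitOn.go, List.isPrefixOf]]
        rw [List.drop_one, List.tail_cons, ih _ _ _ (by simpa using Nat.lt_of_succ_lt_succ h)]
        cases hr : mySplit rest with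
        | nil => exact absurd hr (mySplit_ne_nil rest)
        | cons a t => simp [mySplit, hr]
      · have hc' : ¬ (':' = c) := fun hh => hc hh.symm
        rw [show PySem.Chars.splitOn.go [':'] (fuel+1) (c :: rest) cur acc
              = PySem.Chars.splitOn.go [':'] fuel rest (c :: cur) acc by
            simp [PySem.Chars.splitOn.go, List.isPrefixOf, hc']]
        rw [ih _ _ _ (by simpa using Nat.lt_of_succ_lt_succ h)]
        cases hr : mySplit rest with
        | nil => exact absurd hr (mySplit_ne_nil rest)
        | cons a t => simp [mySplit, hr, hc]

theorem splitOn_eq_mySplit (cs : List Char) :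
    PySem.Chars.splitOn cs [':'] = mySplit cs := by
  rw [PySem.Chars.splitOn, splitOn_go_eq _ _ _ _ (by omega)]
  cases hr : mySplit cs with
  | nil => exact absurd hr (mySplit_ne_nil cs)
  | cons a t => simp

theorem intercalate_colon_cons (x y : List Char) (ys : List (List Char)) :
    List.intercalate [':'] (x :: y :: ys) = x ++ ':' :: List.intercalate [':'] (y :: ys) := by
  simp [List.intercalate, List.intersperse]

theorem join_mySplit (cs : List Char) :
    PySem.Chars.join [':'] (mySplit cs) = cs := by
  induction cs with
  | nil => simp [mySplit, PySem.Chars.join, List.intercalate]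
  | cons c r ih =>
    cases hr : mySplit r with
    | nil => exact absurd hr (mySplit_ne_nil r)
    | cons a t =>
      rw [hr] at ih
      by_cases h : c = ':'
      · subst h
        rw [show mySplit (':' :: r) = [] :: a :: t from by simp [mySplit, hr]]
        simp only [PySem.Chars.join] at *
        rw [intercalate_colon_cons]
        simp [ih]
      · simp only [mySplit, if_neg h, hr, List.modifyHead, PySem.Chars.join] at *
        cases t with
        | nil => simpa [List.intercalate, List.intersperse] using congrArg (c :: ·) (by simpa [List.intercalate, List.intersperse] using ih)
        | cons b t' =>
          rw [intercalate_colon_cons] at ih ⊢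
          simp [← ih]

theorem mySplit_no_colon (cs : List Char) (h : ':' ∉ cs) : mySplit cs = [cs] := by
  induction cs with
  | nil => simp [mySplit]
  | cons c r ih =>
    simp only [List.mem_cons, not_or] at h
    have hc : ¬ c = ':' := fun hh => h.1 hh.symm
    simp [mySplit, hc, ih h.2]

theorem mySplit_append (f r : List Char) (h : ':' ∉ f) :
    mySplit (f ++ ':' :: r) = f :: mySplit r := by
  induction f with
  | nil => simp [mySplit]
  | cons c f ih =>
    simp only [List.mem_cons, not_or] at h
    have hc : ¬ c = ':' := fun hh => h.1 hh.symm
    simp [mySplit, hc, ih h.2]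

theorem pvPartColon_no_colon (cs : List Char) (h : ':' ∉ cs) : pvPartColon cs = (cs, []) := by
  induction cs with
  | nil => simp [pvPartColon]
  | cons c r ih =>
    simp only [List.mem_cons, not_or] at h
    have hc : ¬ c = ':' := fun hh => h.1 hh.symm
    simp [pvPartColon, hc, ih h.2]

theorem pvPartColon_append (f r : List Char) (h : ':' ∉ f) :
    pvPartColon (f ++ ':' :: r) = (f, r) := by
  induction f with
  | nil => simp [pvPartColon]
  | cons c f ih =>
    simp only [List.mem_cons, not_or] at h
    have hc : ¬ c = ':' := fun hh => h.1 hh.symm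
    simp [pvPartColon, hc, ih h.2]

theorem colon_decomp (cs : List Char) (h : ':' ∈ cs) :
    ∃ f r, cs = f ++ ':' :: r ∧ ':' ∉ f := by
  induction cs with
  | nil => simp at h
  | cons c rest ih =>
    by_cases hc : c = ':'
    · exact ⟨[], rest, by simp [hc], by simp⟩
    · have hmem : ':' ∈ rest := by
        rcases List.mem_cons.mp h with h1 | h1
        · exact absurd h1.symm hc
        · exact h1
      obtain ⟨f, r, heq, hf⟩ := ih hmem
      refine ⟨c :: f, r, by simp [heq], ?_⟩
      simp only [List.mem_cons, not_or]
      exact ⟨fun hh => hc hh.symm, hf⟩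

theorem ofList_ne_empty (cs : List Char) (h : cs ≠ []) : String.ofList cs ≠ "" := by
  intro hcon
  apply h
  have := congrArg String.toList hcon
  rw [String.toList_ofList] at this
  simpa using this

-- the finishing step of B after the loop fell through
def altFinish (p : List String × Bool) : List String :=
  match p with
  | (result, true) => result
  | (result, false) =>
      if result ≠ [] ∧ PySem.List.pyGet? result (-1) = some "" then result.dropLast
      else result

theorem key (cs : List Char) (res : List String) :
    pvLoopA cs res = altFinish (pvAltLoop (mySplit cs) res) := by
  by_cases hmem : ':' ∈ cs
  · obtain ⟨f, r, heq, hf⟩ := colon_decomp cs hmem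
    subst heq
    rw [pvLoopA]
    simp only [pvPartColon_append f r hf, mySplit_append f r hf, pvAltLoop,
      join_mySplit r, dif_neg (by simp : ¬ (f ++ ':' :: r = []))]
    by_cases hb : (PySem.Chars.startswith r ['{'] || PySem.Chars.startswith r ['[']) = true
    · simp [hb, altFinish]
    · simp only [Bool.not_eq_true] at hb
      simp only [hb, Bool.false_eq_true, if_false]
      exact key r (res ++ [String.ofList f])
  · have hsplit := mySplit_no_colon cs hmem
    have hpart := pvPartColon_no_colon cs hmem
    have hjoin : PySem.Chars.join [':'] ([] : List (List Char)) = [] := by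
      simp [PySem.Chars.join, List.intercalate]
    have hsw1 : PySem.Chars.startswith ([] : List Char) ['{'] = false := rfl
    have hsw2 : PySem.Chars.startswith ([] : List Char) ['['] = false := rfl
    cases hcs : cs with
    | nil =>
      have h1 : pvLoopA [] res = res := by rw [pvLoopA]; simp
      have h2 : pvAltLoop (mySplit []) res = (res ++ [""], false) := rfl
      rw [h1, h2]
      simp only [altFinish]
      rw [if_pos ⟨by simp, by rw [PySem.List.pyGet?_neg_one, List.getLast?_concat]⟩]
      exact (List.dropLast_concat ..).symm
    | cons c rest =>
      rw [← hcs]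
      have hA : pvLoopA cs res = res ++ [String.ofList cs] := by
        rw [pvLoopA]
        simp only [dif_neg (show ¬ cs = [] by simp [hcs]), hpart, hsw1, hsw2, Bool.or_self,
          Bool.false_eq_true, if_false]
        rw [pvLoopA]
        simp
      have hB : pvAltLoop (mySplit cs) res = (res ++ [String.ofList cs], false) := by
        rw [hsplit]
        simp only [pvAltLoop, hjoin, hsw1, hsw2, Bool.or_self, Bool.false_eq_true, if_false]
      rw [hA, hB]
      simp only [altFinish]
      rw [if_neg]
      intro hcon
      have h2 := hcon.2
      rw [PySem.List.pyGet?_neg_one, List.getLast?_concat] at h2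
      exact ofList_ne_empty cs (by simp [hcs]) (by injection h2)
termination_by cs.length
decreasing_by subst heq; simp only [List.length_append, List.length_cons]; omega

-- ===== VERDICT (by name: the statement is the Claim_ definition above) =====
theorem process_config_path_spec : Claim_equal_process_config_path := by
  intro path _hdom hpre
  unfold Spec_process_config_path process_config_path process_config_path_alt
  rw [Pre_process_config_path] at hpre
  simp only [hpre, Bool.false_eq_true, if_false, splitOn_eq_mySplit]
  rw [key path.toList []]
  rfl
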